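-- pv_equiv track=rewrite | github.com/SidJain1412/CompetitiveProgramming | Miscellaneous/NobleInteger.py | solve
-- ===== SOURCE A (Python) =====
-- def solve(A):
--     A = sorted(A)
--     size = len(A)
--     i = 0
--     while i < size:
--         temp = A[i]
--         # Checking for the same number being repeated multiple times
--         # Example: 0,0,2,2,3 should be -1 (as 2 isn't greater than 2)
--         while(i < size - 1 and A[i + 1] == temp):
--             i += 1
--         if(temp == size - i - 1):
--             return 1
--         i += 1
--     return -1
-- ===== SOURCE B (Python) =====
-- def solve(A):
--     for x in A:
--         greater = 0
--         for y in A: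
--             if y > x:
--                 greater += 1
--         if x == greater:
--             return 1
--     return -1
-- ===== Notes on version B (the rewrite author's own statement) =====
-- stated objective: simpler
-- what changed: B drops A's sort and duplicate-skipping index scan entirely: it is a direct sort-free double scan that, for each element, counts the elements strictly greater than it and returns 1 on the first element equal to that count.
import Mathlib
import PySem

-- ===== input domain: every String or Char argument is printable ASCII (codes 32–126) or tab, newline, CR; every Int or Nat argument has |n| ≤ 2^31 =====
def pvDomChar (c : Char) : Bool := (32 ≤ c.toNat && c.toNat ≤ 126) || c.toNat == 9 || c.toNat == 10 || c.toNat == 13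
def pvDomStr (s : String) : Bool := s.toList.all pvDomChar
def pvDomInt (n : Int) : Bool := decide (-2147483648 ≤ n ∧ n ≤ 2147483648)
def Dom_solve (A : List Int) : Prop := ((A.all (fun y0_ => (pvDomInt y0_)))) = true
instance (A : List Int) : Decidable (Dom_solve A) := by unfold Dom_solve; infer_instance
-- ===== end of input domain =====

-- B drops A's sort and duplicate-skipping index scan entirely: it is a direct sort-free
-- double scan that, for each element, counts the elements strictly greater than it and
-- returns 1 on the first element equal to that count (objective: simpler; not faster).

-- ===== PORT A =====
-- inner while loop of A: skip over consecutive duplicates of temp. Python's i stays a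
-- nonnegative int, so it is carried as a Nat; every index read is in range, so getD's
-- default is never used. The fuel argument only guards totality: the loop adds at most
-- size - 1 - i to i, so the fuel `size` it is called with is never exhausted.
def solveSkip (S : List Int) (size : Nat) (temp : Int) : Nat → Nat → Nat
  | 0, i => i
  | fuel + 1, i =>
    if i < size - 1 ∧ S.getD (i + 1) 0 = temp then solveSkip S size temp fuel (i + 1) else i

-- outer while loop of A; fuel is again only a totality guard (i grows by at least 1 per
-- iteration, so the fuel `size + 1` it is called with is never exhausted)
def solveLoop (S : List Int) (size : Nat) : Nat → Nat → Int
  | 0, _ => -1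
  | fuel + 1, i =>
    if i < size then
      let temp := S.getD i 0
      let j := solveSkip S size temp size i
      if temp = (size : Int) - j - 1 then 1 else solveLoop S size fuel (j + 1)
    else -1

def solve (A : List Int) : Int :=
  let S := PySem.List.sorted A (fun x => x) false
  solveLoop S S.length (S.length + 1) 0

-- ===== PORT B =====
-- inner for-loop of B: count the elements of A strictly greater than x
def altCnt (A : List Int) (x : Int) : Int :=
  A.foldl (fun g y => if x < y then g + 1 else g) 0

-- outer for-loop of B: return 1 at the first element equal to its strictly-greater count
def altLoop (A : List Int) (rest : List Int) : Int :=
  match rest with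
  | [] => -1
  | x :: t => if x = altCnt A x then 1 else altLoop A t

def solve_alt (A : List Int) : Int := altLoop A A

-- ===== PRECONDITION & SPEC =====
def Spec_solve (A : List Int) (out : Int) : Prop := out = solve_alt A
instance (A : List Int) (out : Int) : Decidable (Spec_solve A out) := by unfold Spec_solve; infer_instance

-- ===== CLAIM (what is proved, stated in full; the proofs are below) =====
def Claim_equal_solve : Prop := ∀ (A : List Int), Dom_solve A → Spec_solve A (solve A)

-- ===== LEMMAS AND PROOFS =====

-- number of elements of A strictly greater than v
def cntGt (A : List Int) (v : Int) : Nat := (A.filter (fun y => decide (v < y))).length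

-- the common value both ports compute
def noble (A : List Int) : Int :=
  if ∃ x ∈ A, (x : Int) = (cntGt A x : Int) then 1 else -1

theorem solveSkip_ge (S : List Int) (size : Nat) (temp : Int) :
    ∀ (fuel i : Nat), i ≤ solveSkip S size temp fuel i := by
  intro fuel
  induction fuel with
  | zero => intro i; simp [solveSkip]
  | succ f ih =>
    intro i
    simp only [solveSkip]
    split
    · exact le_trans (Nat.le_succ i) (ih (i + 1))
    · exact Nat.le_refl i

theorem solveSkip_lt (S : List Int) (size : Nat) (temp : Int) :
    ∀ (fuel i : Nat), i < size → solveSkip S size temp fuel i < size := by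
  intro fuel
  induction fuel with
  | zero => intro i h; simpa [solveSkip] using h
  | succ f ih =>
    intro i h
    simp only [solveSkip]
    split
    next hc => exact ih (i + 1) (by omega)
    next => exact h

theorem solveSkip_all_eq (S : List Int) (size : Nat) (temp : Int) :
    ∀ (fuel i : Nat), S.getD i 0 = temp →
      ∀ k, i ≤ k → k ≤ solveSkip S size temp fuel i → S.getD k 0 = temp := by
  intro fuel
  induction fuel with
  | zero =>
    intro i h0 k hik hki
    simp only [solveSkip] at hki
    have : k = i := by omega
    subst this; exact h0
  | succ f ih =>
    intro i h0 k hik hki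
    simp only [solveSkip] at hki
    split at hki
    next h =>
      rcases Nat.eq_or_lt_of_le hik with rfl | hlt
      · exact h0
      · exact ih (i + 1) h.2 k (by omega) hki
    next h =>
      have : k = i := by omega
      subst this; exact h0

-- with enough fuel the inner loop really stops at a non-duplicate position
theorem solveSkip_stop (S : List Int) (size : Nat) (temp : Int) :
    ∀ (fuel i : Nat), size - 1 - i ≤ fuel →
      ¬ (solveSkip S size temp fuel i < size - 1 ∧
          S.getD (solveSkip S size temp fuel i + 1) 0 = temp) := by
  intro fuel
  induction fuel with
  | zero =>
    intro i hf
    simp only [solveSkip]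
    intro h
    omega
  | succ f ih =>
    intro i hf
    simp only [solveSkip]
    split
    next h => exact ih (i + 1) (by omega)
    next h => exact h

theorem mem_drop_iff (S : List Int) (m : Nat) (x : Int) :
    x ∈ S.drop m ↔ ∃ k, ∃ h : k < S.length, m ≤ k ∧ S[k] = x := by
  rw [List.mem_iff_getElem]
  constructor
  · rintro ⟨n, hn, rfl⟩
    have hn' : m + n < S.length := by
      have := List.length_drop (l := S) (i := m); omega
    exact ⟨m + n, hn', by omega, by rw [List.getElem_drop]⟩
  · rintro ⟨k, hk, hmk, rfl⟩
    have hn : k - m < (S.drop m).length := by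
      have := List.length_drop (l := S) (i := m); omega
    refine ⟨k - m, hn, ?_⟩
    rw [List.getElem_drop]
    congr 1; omega

-- after the duplicate skip, size - (j+1) elements of the sorted list are strictly greater than temp
theorem skip_filter_eq_drop (S : List Int) (hs : S.Pairwise (· ≤ ·)) (i : Nat)
    (hi : i < S.length) :
    S.filter (fun y => decide (S.getD i 0 < y)) =
      S.drop (solveSkip S S.length (S.getD i 0) S.length i + 1) := by
  set temp := S.getD i 0 with htemp
  set j := solveSkip S S.length temp S.length i with hjdef
  have hij : i ≤ j := solveSkip_ge S S.length temp S.length i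
  have hjlt : j < S.length := solveSkip_lt S S.length temp S.length i hi
  have mono : ∀ p q (hp : p < S.length) (hq : q < S.length), p ≤ q → S[p] ≤ S[q] := by
    intro p q hp hq hpq
    rcases Nat.eq_or_lt_of_le hpq with rfl | h
    · exact le_refl _
    · exact (List.pairwise_iff_getElem.mp hs) p q hp hq h
  have hSj : S[j] = temp := by
    have := solveSkip_all_eq S S.length temp S.length i rfl j hij (le_refl _)
    rwa [List.getD_eq_getElem S 0 hjlt] at this
  have hle : ∀ k (hk : k < S.length), k ≤ j → S[k] ≤ temp := by
    intro k hk hkj; rw [← hSj]; exact mono k j hk hjlt hkj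
  have hgt : ∀ k (hk : k < S.length), j < k → temp < S[k] := by
    intro k hk hjk
    have hj1 : j + 1 < S.length := by omega
    have hstop := solveSkip_stop S S.length temp S.length i (by omega)
    rw [← hjdef] at hstop
    have hne : S[j + 1] ≠ temp := by
      intro hcontra
      exact hstop ⟨by omega, by rwa [List.getD_eq_getElem S 0 hj1]⟩
    have hge : temp ≤ S[j + 1] := by rw [← hSj]; exact mono j (j + 1) hjlt hj1 (by omega)
    have h1 : temp < S[j + 1] := lt_of_le_of_ne hge (Ne.symm hne)
    exact lt_of_lt_of_le h1 (mono (j + 1) k hj1 hk (by omega))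
  conv_lhs => rw [← List.take_append_drop (j + 1) S]
  rw [List.filter_append]
  have h1 : (S.take (j + 1)).filter (fun y => decide (temp < y)) = [] := by
    rw [List.filter_eq_nil_iff]
    intro a ha
    rw [List.mem_iff_getElem] at ha
    obtain ⟨n, hn, rfl⟩ := ha
    have hlen : n < j + 1 ∧ n < S.length := by
      have := List.length_take (i := j + 1) (l := S); omega
    rw [List.getElem_take]
    simpa using not_lt_of_ge (hle n hlen.2 (by omega))
  have h2 : (S.drop (j + 1)).filter (fun y => decide (temp < y)) = S.drop (j + 1) := by
    rw [List.filter_eq_self]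
    intro a ha
    rw [mem_drop_iff] at ha
    obtain ⟨k, hk, hmk, rfl⟩ := ha
    simpa using hgt k hk (by omega)
  rw [h1, h2, List.nil_append]

theorem solveLoop_eq (S : List Int) (hs : S.Pairwise (· ≤ ·)) :
    ∀ (fuel i : Nat), S.length - i < fuel →
      solveLoop S S.length fuel i =
        if ∃ x ∈ S.drop i, (x : Int) = (cntGt S x : Int) then 1 else -1 := by
  intro fuel
  induction fuel with
  | zero => intro i hf; omega
  | succ f ih =>
    intro i hf
    simp only [solveLoop]
    by_cases hi : i < S.length
    · rw [if_pos hi]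
      set temp := S.getD i 0 with htemp
      set j := solveSkip S S.length temp S.length i with hjdef
      have hij : i ≤ j := solveSkip_ge S S.length temp S.length i
      have hjlt : j < S.length := solveSkip_lt S S.length temp S.length i hi
      have hcnt : cntGt S temp = S.length - (j + 1) := by
        unfold cntGt
        rw [htemp, skip_filter_eq_drop S hs i hi, ← htemp, ← hjdef, List.length_drop]
      have htempmem : temp ∈ S.drop i := by
        rw [mem_drop_iff]
        exact ⟨i, hi, le_refl _, (List.getD_eq_getElem S 0 hi).symm⟩
      by_cases hc : temp = (S.length : Int) - j - 1
      · rw [if_pos hc]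
        have : ∃ x ∈ S.drop i, (x : Int) = (cntGt S x : Int) := by
          refine ⟨temp, htempmem, ?_⟩
          rw [hcnt]; omega
        rw [if_pos this]
      · rw [if_neg hc]
        have hPtemp : ¬ ((temp : Int) = (cntGt S temp : Int)) := by
          rw [hcnt]; omega
        rw [ih (j + 1) (by omega)]
        have hiff : (∃ x ∈ S.drop (j + 1), (x : Int) = (cntGt S x : Int)) ↔
            (∃ x ∈ S.drop i, (x : Int) = (cntGt S x : Int)) := by
          constructor
          · rintro ⟨x, hx, hPx⟩
            refine ⟨x, ?_, hPx⟩
            rw [mem_drop_iff] at hx ⊢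
            obtain ⟨k, hk, hmk, rfl⟩ := hx
            exact ⟨k, hk, by omega, rfl⟩
          · rintro ⟨x, hx, hPx⟩
            rw [mem_drop_iff] at hx
            obtain ⟨k, hk, hmk, rfl⟩ := hx
            by_cases hkj : k ≤ j
            · exfalso
              have := solveSkip_all_eq S S.length temp S.length i rfl k hmk
                (by rw [← hjdef]; omega)
              rw [List.getD_eq_getElem S 0 hk] at this
              rw [this] at hPx
              exact hPtemp hPx
            · refine ⟨S[k], ?_, hPx⟩
              rw [mem_drop_iff]
              exact ⟨k, hk, by omega, rfl⟩
        rw [if_congr hiff rfl rfl]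
    · rw [if_neg hi]
      have : S.drop i = [] := List.drop_eq_nil_of_le (by omega)
      rw [this]
      simp

theorem solve_eq_noble (A : List Int) : solve A = noble A := by
  unfold solve noble
  set S := PySem.List.sorted A (fun x => x) false with hS
  have hs : S.Pairwise (· ≤ ·) := by
    have := PySem.List.sorted_pairwise (xs := A) (key := fun x => x)
    simpa using this
  have h := solveLoop_eq S hs (S.length + 1) 0 (by omega)
  rw [List.drop_zero] at h
  rw [h]
  have hperm : S.Perm A := PySem.List.sorted_perm A (fun x => x) false
  have hcnt : ∀ x, cntGt S x = cntGt A x := by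
    intro x
    unfold cntGt
    exact (hperm.filter _).length_eq
  have hiff : (∃ x ∈ S, (x : Int) = (cntGt S x : Int)) ↔
      (∃ x ∈ A, (x : Int) = (cntGt A x : Int)) := by
    constructor
    · rintro ⟨x, hx, hPx⟩
      exact ⟨x, hperm.mem_iff.mp hx, by rwa [← hcnt x]⟩
    · rintro ⟨x, hx, hPx⟩
      exact ⟨x, hperm.mem_iff.mpr hx, by rwa [hcnt x]⟩
  rw [if_congr hiff rfl rfl]

-- B's inner count loop computes exactly cntGt
theorem altCnt_foldl (x : Int) (l : List Int) (g : Int) :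
    l.foldl (fun g y => if x < y then g + 1 else g) g =
      g + ((l.filter (fun y => decide (x < y))).length : Int) := by
  induction l generalizing g with
  | nil => simp
  | cons a t ih =>
    by_cases h : x < a
    · simp [List.foldl_cons, h, ih]; ring
    · simp [List.foldl_cons, h, ih]

theorem altCnt_eq (A : List Int) (x : Int) : altCnt A x = (cntGt A x : Int) := by
  unfold altCnt cntGt
  rw [altCnt_foldl]
  ring

theorem altLoop_eq (A : List Int) (rest : List Int) :
    altLoop A rest = if ∃ x ∈ rest, (x : Int) = (cntGt A x : Int) then 1 else -1 := by
  induction rest with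
  | nil => simp [altLoop]
  | cons v t ih =>
    rw [altLoop, altCnt_eq, ih]
    by_cases hv : v = (cntGt A v : Int)
    · rw [if_pos hv, if_pos ⟨v, List.mem_cons_self, hv⟩]
    · rw [if_neg hv]
      have hiff : (∃ x ∈ t, (x : Int) = (cntGt A x : Int)) ↔
          (∃ x ∈ v :: t, (x : Int) = (cntGt A x : Int)) := by
        rw [List.exists_mem_cons_iff]
        exact (or_iff_right hv).symm
      rw [if_congr hiff rfl rfl]

theorem alt_eq_noble (A : List Int) : solve_alt A = noble A := by
  unfold solve_alt noble
  rw [altLoop_eq]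

-- ===== VERDICT (by name: the statement is the Claim_ definition above) =====
theorem solve_spec : Claim_equal_solve := by
  intro A _
  unfold Spec_solve
  rw [solve_eq_noble, alt_eq_noble]
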